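-- pv_equiv track=rewrite | github.com/zachro/cs50 | pset6/crack.py | increment_guess
-- ===== SOURCE A (Python) =====
-- def find_index(input_value, input_list):
--     for i in range(len(input_list)):
--         if input_list[i] == input_value:
--             return i
--     exit(3)
--
-- def increment_char(input_char):
--     char_mapping = ['A','B','C','D','E','F','G','H','I','J','K','L','M','N','O','P','Q','R','S','T','U','V','W','X','Y','Z','a','b','c','d','e','f','g','h','i','j','k','l','m','n','o','p','q','r','s','t','u','v','w','x','y','z']
--     input_index = find_index(input_char, char_mapping)
--     output_index = input_index + 1
--     if output_index == 52:
--         output_index = 0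
--     return char_mapping[output_index]
--
-- def increment_guess(input_guess):
--     guess_index = 0
--     while input_guess[guess_index] == 'z':
--         guess_index += 1
--         if guess_index >= len(input_guess):
--             guess_index -= 1
--             break
--
--     while guess_index >= 0:
--         input_guess[guess_index] = increment_char(input_guess[guess_index])
--         guess_index -= 1
--     return input_guess
-- ===== SOURCE B (Python) =====
-- ALPHABET = 'ABCDEFGHIJKLMNOPQRSTUVWXYZabcdefghijklmnopqrstuvwxyz'
--
-- def increment_guess(input_guess):
--     # Splice-based rewrite: find the end of the leading 'z'-run, then rebuild the
--     # changed prefix in one slice assignment (mutates input_guess in place, like A):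
--     # successor by modular index arithmetic instead of a per-character lookup loop.
--     k = next((i for i, c in enumerate(input_guess) if c != 'z'), len(input_guess))
--     if k == len(input_guess):
--         input_guess[:] = ['A'] * k
--     else:
--         succ = ALPHABET[(ALPHABET.index(input_guess[k]) + 1) % 52]
--         input_guess[:k + 1] = ['A'] * k + [succ]
--     return input_guess
-- ===== Notes on version B (the rewrite author's own statement) =====
-- stated objective: alternative
-- what changed: Replaces A's two mutation loops (backward per-element increment with a linear find_index table scan per character) by locating the leading 'z'-run boundary once and rebuilding the changed prefix in a single slice assignment, with the successor computed by modular index arithmetic on an alphabet string.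
import Mathlib
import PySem

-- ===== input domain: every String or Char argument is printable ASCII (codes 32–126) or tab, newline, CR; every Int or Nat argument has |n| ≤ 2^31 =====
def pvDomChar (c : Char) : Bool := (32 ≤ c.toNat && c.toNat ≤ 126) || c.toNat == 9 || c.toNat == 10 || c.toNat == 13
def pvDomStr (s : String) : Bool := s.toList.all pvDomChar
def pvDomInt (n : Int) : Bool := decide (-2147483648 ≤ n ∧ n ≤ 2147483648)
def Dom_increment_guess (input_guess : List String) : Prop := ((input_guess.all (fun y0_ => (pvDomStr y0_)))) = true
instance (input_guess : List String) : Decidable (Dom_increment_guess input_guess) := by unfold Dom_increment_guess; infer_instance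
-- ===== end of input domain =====

-- B replaces A's two mutation loops (backward per-element increment with a linear
-- find_index scan per character) by one boundary search plus a single slice splice with a
-- modular-arithmetic successor; equal return value on Pre_ (both Pythons mutate in place alike).


-- ===== PORT A =====
def pyCharMapping : List String := ["A", "B", "C", "D", "E", "F", "G", "H", "I", "J", "K", "L", "M", "N", "O", "P", "Q", "R", "S", "T", "U", "V", "W", "X", "Y", "Z", "a", "b", "c", "d", "e", "f", "g", "h", "i", "j", "k", "l", "m", "n", "o", "p", "q", "r", "s", "t", "u", "v", "w", "x", "y", "z"]

-- for i in range(len(input_list)): if input_list[i] == input_value: return i; exit(3) -> none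
-- (the index walk over the list is written as structural recursion on the yet-unvisited suffix)
def findIndexAux (v : String) : List String → Nat → Option Int
  | [], _ => none                                -- range exhausted: exit(3)
  | x :: rest, i => if x = v then some (i : Int) else findIndexAux v rest (i + 1)

def find_index (input_value : String) (input_list : List String) : Option Int :=
  findIndexAux input_value input_list 0

def increment_char (input_char : String) : Option String :=
  match find_index input_char pyCharMapping with
  | none => none                                 -- exit(3)
  | some input_index =>
    let output_index := input_index + 1
    let output_index := if output_index = 52 then (0 : Int) else output_index
    PySem.List.pyGet? pyCharMapping output_index

-- while input_guess[guess_index] == 'z': guess_index += 1; if guess_index >= len: -=1; break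
-- (recursion on the unvisited suffix = input_guess.drop i; [] at i = 0 is the IndexError case)
def loop1Aux (len : Nat) : List String → Nat → Option Nat
  | [], _ => none                                -- IndexError (only reachable on the empty list)
  | s :: rest, i =>
    if s = "z" then
      if len ≤ i + 1 then some i                 -- guess_index -= 1; break
      else loop1Aux len rest (i + 1)
    else some i

-- while guess_index >= 0: input_guess[guess_index] = increment_char(…); guess_index -= 1
def loop2 : List String → Nat → Option (List String)
  | g, 0 =>
    match increment_char ((g.drop 0).headD "") with
    | none => none                               -- exit(3) propagates
    | some v => some (g.set 0 v)
  | g, gi + 1 =>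
    match increment_char ((g.drop (gi + 1)).headD "") with
    | none => none                               -- exit(3) propagates
    | some v => loop2 (g.set (gi + 1) v) gi

def increment_guess (input_guess : List String) : List String :=
  match loop1Aux input_guess.length input_guess 0 with
  | none => []                                   -- IndexError raised; outside Pre_
  | some gi => (loop2 input_guess gi).getD []    -- getD: exit(3) raised; outside Pre_

-- ===== PORT B =====
def pyALPHABET : String := "ABCDEFGHIJKLMNOPQRSTUVWXYZabcdefghijklmnopqrstuvwxyz"

-- k = next((i for i, c in enumerate(input_guess) if c != 'z'), len(input_guess))
def boundaryAux : List String → Nat → Nat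
  | [], i => i                                   -- generator exhausted: default len(input_guess)
  | c :: rest, i => if c ≠ "z" then i else boundaryAux rest (i + 1)

-- ALPHABET[(ALPHABET.index(c) + 1) % 52]; .index raising ValueError is the none branch
-- (ALPHABET[…] is a one-character Python str, hence the Char → String wrap)
def bsucc (c : String) : Option String :=
  let idx := PySem.Str.find pyALPHABET c
  if idx < 0 then none                           -- ValueError from .index
  else (PySem.Str.pyGet? pyALPHABET (PySem.Int.mod (idx + 1) 52)).map (fun ch => String.ofList [ch])

def increment_guess_alt (input_guess : List String) : List String :=
  let k := boundaryAux input_guess 0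
  if k = input_guess.length then List.replicate k "A"          -- input_guess[:] = ['A'] * k
  else
    match bsucc ((input_guess.drop k).headD "") with           -- input_guess[k]
    | none => []                                               -- ValueError; outside Pre_
    | some succ => List.replicate k "A" ++ [succ] ++ input_guess.drop (k + 1)  -- [:k+1] splice

-- ===== PRECONDITION & SPEC =====
def pvLetters : List String := ["A", "B", "C", "D", "E", "F", "G", "H", "I", "J", "K", "L", "M", "N", "O", "P", "Q", "R", "S", "T", "U", "V", "W", "X", "Y", "Z", "a", "b", "c", "d", "e", "f", "g", "h", "i", "j", "k", "l", "m", "n", "o", "p", "q", "r", "s", "t", "u", "v", "w", "x", "y", "z"]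

-- Exactly where A returns: a nonempty list whose first non-'z' element (if any) is one of the
-- 52 letters; otherwise A raises IndexError (empty list) or SystemExit (exit(3) in find_index).
def Pre_increment_guess (input_guess : List String) : Prop :=
  input_guess ≠ [] ∧ ((input_guess.find? (fun t => t != "z")).getD "A") ∈ pvLetters
instance (input_guess : List String) : Decidable (Pre_increment_guess input_guess) := by
  unfold Pre_increment_guess; infer_instance

def pvWitness_increment_guess : List String := ["z", "a"]

def Spec_increment_guess (input_guess : List String) (out : List String) : Prop := out = increment_guess_alt input_guess
instance (input_guess : List String) (out : List String) : Decidable (Spec_increment_guess input_guess out) := by unfold Spec_increment_guess; infer_instance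

-- ===== CLAIM (what is proved, stated in full; the proofs are below) =====
def Claim_equal_increment_guess : Prop := ∀ (input_guess : List String), Dom_increment_guess input_guess → Pre_increment_guess input_guess → Spec_increment_guess input_guess (increment_guess input_guess)

-- ===== LEMMAS AND PROOFS =====

-- on the 52 letters, B's arithmetic successor agrees with A's increment_char
set_option maxRecDepth 20000 in
lemma bsucc_eq_inc : ∀ s ∈ pvLetters, bsucc s = increment_char s := by decide

set_option maxRecDepth 8000 in
lemma inc_isSome : ∀ s ∈ pvLetters, (increment_char s).isSome := by decide

set_option maxRecDepth 2000 in
lemma inc_z : increment_char "z" = some "A" := by decide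

lemma headD_drop {α : Type} (n : Nat) (g : List α) (d : α) (h : n < g.length) :
    (g.drop n).headD d = g[n] := by
  rw [List.drop_eq_getElem_cons h]; rfl

lemma set_drop_self {α : Type} (n : Nat) (g : List α) (v : α) (h : n < g.length) :
    (g.set n v).drop n = v :: g.drop (n + 1) := by
  induction n generalizing g with
  | zero => cases g with | nil => simp at h | cons a t => simp
  | succ n ih => cases g with
    | nil => simp at h
    | cons a t => simpa using ih t (by simpa using h)

lemma set_getElem_lt {α : Type} (g : List α) (n j : Nat) (v : α) (hj : j < g.length) (hlt : j < n) :
    (g.set n v)[j]'(by simpa using hj) = g[j] := by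
  rw [List.getElem_set_ne (by omega)]

-- loop1 characterizations
lemma loop1Aux_all_z (len : Nat) : ∀ (rest : List String) (i : Nat), rest ≠ [] →
    i + rest.length = len → (∀ x ∈ rest, x = "z") →
    loop1Aux len rest i = some (len - 1) := by
  intro rest
  induction rest with
  | nil => intro i h; exact absurd rfl h
  | cons s rest ih =>
    intro i _ hlen hz
    have hs : s = "z" := hz s (by simp)
    simp only [loop1Aux, hs]
    by_cases hle : len ≤ i + 1
    · have : rest = [] := by
        cases rest with
        | nil => rfl
        | cons a t => simp at hlen; omega
      subst this
      simp at hlen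
      simp [if_pos hle]; omega
    · rw [if_neg hle]
      have hne : rest ≠ [] := by
        cases rest with
        | nil => simp at hlen; omega
        | cons a t => simp
      exact ih (i + 1) hne (by simp at hlen ⊢; omega) (fun x hx => hz x (by simp [hx]))

lemma loop1Aux_first (len : Nat) : ∀ (zs : List String) (c : String) (t : List String) (i : Nat),
    i + (zs ++ c :: t).length = len → (∀ x ∈ zs, x = "z") → c ≠ "z" →
    loop1Aux len (zs ++ c :: t) i = some (i + zs.length) := by
  intro zs
  induction zs with
  | nil => intro c t i _ _ hc; simp [loop1Aux, hc]
  | cons z0 zs ih =>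
    intro c t i hlen hz hc
    have hz0 : z0 = "z" := hz z0 (by simp)
    simp only [List.cons_append, loop1Aux, hz0]
    have hle : ¬ len ≤ i + 1 := by simp at hlen; omega
    rw [if_neg hle]
    have := ih c t (i + 1) (by simp at hlen ⊢; omega) (fun x hx => hz x (by simp [hx])) hc
    rw [this]; simp; omega

-- loop2: increments positions gi, gi-1, …, 0; everything left of gi is 'z'
lemma loop2_spec : ∀ (gi : Nat) (g : List String), gi < g.length →
    (∀ j (hj : j < g.length), j < gi → g[j] = "z") →
    ∀ v, increment_char ((g.drop gi).headD "") = some v →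
    loop2 g gi = some (List.replicate gi "A" ++ v :: g.drop (gi + 1)) := by
  intro gi
  induction gi with
  | zero =>
    intro g hlen _ v hv
    simp only [loop2, hv]
    cases g with
    | nil => simp at hlen
    | cons a t => simp
  | succ gi ih =>
    intro g hlen hpre v hv
    simp only [loop2, hv]
    have hlen' : gi < (g.set (gi + 1) v).length := by simp; omega
    have hgi : ((g.set (gi + 1) v).drop gi).headD "" = "z" := by
      rw [headD_drop gi _ "" hlen', set_getElem_lt g (gi + 1) gi v (by omega) (by omega)]
      exact hpre gi (by omega) (by omega)
    have := ih (g.set (gi + 1) v) hlen'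
      (fun j hj hjlt => by
        rw [set_getElem_lt g (gi + 1) j v (by simp at hj; omega) (by omega)]
        exact hpre j (by simp at hj; omega) (by omega))
      "A" (by rw [hgi]; exact inc_z)
    rw [this, set_drop_self (gi + 1) g v hlen]
    simp [List.replicate_succ']

-- boundaryAux characterizations (the enumerate generator of B)
lemma boundary_all_z : ∀ (g : List String) (i : Nat), (∀ x ∈ g, x = "z") →
    boundaryAux g i = i + g.length := by
  intro g
  induction g with
  | nil => intro i _; simp [boundaryAux]
  | cons a t ih =>
    intro i h
    have ha : a = "z" := h a (by simp)
    simp only [boundaryAux, ha, ne_eq, not_true_eq_false, if_false]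
    rw [ih (i + 1) (fun x hx => h x (by simp [hx]))]
    simp; omega

lemma boundary_first : ∀ (zs : List String) (c : String) (t : List String) (i : Nat),
    (∀ x ∈ zs, x = "z") → c ≠ "z" →
    boundaryAux (zs ++ c :: t) i = i + zs.length := by
  intro zs
  induction zs with
  | nil => intro c t i _ hc; simp [boundaryAux, hc]
  | cons z0 zs ih =>
    intro c t i hz hc
    have hz0 : z0 = "z" := hz z0 (by simp)
    simp only [List.cons_append, boundaryAux, hz0, ne_eq, not_true_eq_false, if_false]
    rw [ih c t (i + 1) (fun x hx => hz x (by simp [hx])) hc]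
    simp; omega

-- Pre_ decomposes the input
lemma pre_decomp : ∀ (g : List String), g ≠ [] →
    ((g.find? (fun t => t != "z")).getD "A") ∈ pvLetters →
    (∀ x ∈ g, x = "z") ∨
    ∃ zs c t, g = zs ++ c :: t ∧ (∀ x ∈ zs, x = "z") ∧ c ≠ "z" ∧ c ∈ pvLetters := by
  intro g
  induction g with
  | nil => intro h; exact absurd rfl h
  | cons a t ih =>
    intro _ hp
    by_cases ha : a = "z"
    · subst ha
      cases t with
      | nil => left; simp
      | cons b t' =>
        have hp' : (((b :: t').find? (fun t => t != "z")).getD "A") ∈ pvLetters := by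
          rw [List.find?_cons_of_neg (by decide)] at hp
          exact hp
        rcases ih (by simp) hp' with h1 | ⟨zs, c, t'', heq, hzs, hc, hcl⟩
        · left; intro x hx; rcases (List.mem_cons.mp hx) with h | h
          · exact h
          · exact h1 x h
        · right; exact ⟨"z" :: zs, c, t'', by simp [heq], by
            intro x hx; rcases (List.mem_cons.mp hx) with h | h
            · exact h
            · exact hzs x h, hc, hcl⟩
    · right
      refine ⟨[], a, t, by simp, by simp, ha, ?_⟩
      have hcb : (a != "z") = true := by simp [ha]
      rw [List.find?_cons_of_pos (p := fun t => t != "z") hcb] at hp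
      simpa using hp

-- ===== VERDICT (by name: the statement is the Claim_ definition above) =====
theorem increment_guess_spec : Claim_equal_increment_guess := by
  intro g _ hpre
  obtain ⟨hne, hmem⟩ := hpre
  unfold Spec_increment_guess
  rcases pre_decomp g hne hmem with hz | ⟨zs, c, t, heq, hzs, hc, hcl⟩
  · -- all-'z' input: every position becomes 'A'
    have hB : increment_guess_alt g = List.replicate g.length "A" := by
      simp only [increment_guess_alt, boundary_all_z g 0 hz, Nat.zero_add]
      simp
    have h1 : loop1Aux g.length g 0 = some (g.length - 1) :=
      loop1Aux_all_z g.length g 0 hne (by omega) hz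
    have hlen1 : 1 ≤ g.length := by
      cases g with | nil => exact absurd rfl hne | cons a t => simp
    have hgl : g[g.length - 1]'(by omega) = "z" := hz _ (List.getElem_mem _)
    have h2 := loop2_spec (g.length - 1) g (by omega)
      (fun j hj _ => hz _ (List.getElem_mem _)) "A"
      (by rw [headD_drop _ g "" (by omega), hgl]; exact inc_z)
    have hd : g.drop (g.length - 1 + 1) = [] := List.drop_eq_nil_of_le (by omega)
    rw [hB]
    simp only [increment_guess, h1, h2, hd, Option.getD_some]
    rw [← List.replicate_succ']
    congr 1
    omega
  · -- leading 'z's then a letter c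
    obtain ⟨v, hv⟩ := Option.isSome_iff_exists.mp (inc_isSome c hcl)
    have hlt : zs.length < g.length := by subst heq; simp
    have hdz : g.drop zs.length = c :: t := by subst heq; simp
    have hgc : g[zs.length]'hlt = c := by
      rw [← headD_drop zs.length g "" hlt, hdz]; rfl
    have hd1 : g.drop (zs.length + 1) = t := by
      rw [← List.tail_drop, hdz]; rfl
    have hB : increment_guess_alt g = List.replicate zs.length "A" ++ [v] ++ t := by
      have hk : boundaryAux g 0 = zs.length := by
        rw [heq]; simpa using boundary_first zs c t 0 hzs hc
      have hhead : (g.drop (boundaryAux g 0)).headD "" = c := by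
        rw [hk, headD_drop zs.length g "" hlt, hgc]
      simp only [increment_guess_alt, hk, if_neg (by omega : ¬ zs.length = g.length)]
      have : bsucc ((g.drop zs.length).headD "") = some v := by
        rw [headD_drop zs.length g "" hlt, hgc, bsucc_eq_inc c hcl, hv]
      simp only [this, hd1]
    have hjz : ∀ j (hj : j < g.length), j < zs.length → g[j] = "z" := by
      intro j hj hjlt
      have : g[j] = zs[j]'(hjlt) := by
        subst heq; rw [List.getElem_append_left hjlt]
      rw [this]; exact hzs _ (List.getElem_mem _)
    have h1 : loop1Aux g.length g 0 = some zs.length := by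
      have := loop1Aux_first g.length zs c t 0 (by subst heq; simp) hzs hc
      subst heq; simpa using this
    have h2 := loop2_spec zs.length g hlt hjz v
      (by rw [headD_drop _ g "" hlt, hgc]; exact hv)
    rw [hB]
    simp only [increment_guess, h1, h2, hd1, Option.getD_some]
    simp
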